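-- pv_equiv track=rewrite | github.com/amohith7/jhfrc-address2tract | src/phi_validator.py | _matches_phi
-- ===== SOURCE A (Python) =====
-- def _matches_phi(column: str, indicator: str) -> bool:
--     """
--     Check whether a column name matches a PHI indicator.
--     Matches are made at word boundaries (underscore-delimited tokens),
--     so 'filename' does not match 'name', but 'patient_name' does.
--     """
--     col_norm = column.lower().strip().replace(" ", "_")
--     indicator_parts = indicator.lower().replace(" ", "_").split("_")
--     col_parts = col_norm.split("_")
--
--     # Exact match
--     if col_norm == "_".join(indicator_parts):
--         return True
--
--     # Match as a contiguous token sequence within the column name parts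
--     n = len(indicator_parts)
--     for i in range(len(col_parts) - n + 1):
--         if col_parts[i : i + n] == indicator_parts:
--             return True
--
--     return False
-- ===== SOURCE B (Python) =====
-- def _matches_phi(column: str, indicator: str) -> bool:
--     """Word-boundary match via underscore-padded substring search:
--     pad both normalized strings with '_' on each side; the indicator's token
--     sequence occurs in the column's token list iff the padded indicator is a
--     substring of the padded column (the padding enforces token boundaries and
--     subsumes the exact-match case)."""
--     col_norm = column.lower().strip().replace(" ", "_")
--     ind_norm = indicator.lower().replace(" ", "_")
--     return "_" + ind_norm + "_" in "_" + col_norm + "_"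
-- ===== Notes on version B (the rewrite author's own statement) =====
-- stated objective: idiomatic
-- what changed: Replaces the split-into-tokens plus sliding-window list-slice comparison (and the separate exact-match branch, which it subsumes) by a single underscore-padded substring test on the normalized strings.
import Mathlib
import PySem

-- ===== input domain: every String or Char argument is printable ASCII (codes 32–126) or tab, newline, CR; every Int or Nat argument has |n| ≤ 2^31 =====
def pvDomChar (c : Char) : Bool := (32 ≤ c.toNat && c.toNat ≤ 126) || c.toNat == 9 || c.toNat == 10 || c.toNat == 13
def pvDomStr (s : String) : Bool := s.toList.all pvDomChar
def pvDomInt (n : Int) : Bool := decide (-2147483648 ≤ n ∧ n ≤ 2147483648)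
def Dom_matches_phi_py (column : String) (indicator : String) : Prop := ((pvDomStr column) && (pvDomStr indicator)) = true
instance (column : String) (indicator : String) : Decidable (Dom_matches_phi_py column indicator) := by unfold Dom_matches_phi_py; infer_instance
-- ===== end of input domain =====

-- B replaces A's token-list sliding-window comparison by a single underscore-padded substring test (idiomatic; subsumes A's exact-match branch).

-- ===== PORT A =====
-- the early-return loop 'for i in range(len(col_parts) - n + 1): if col_parts[i:i+n] == indicator_parts: return True'
def phiLoopA (col_parts indicator_parts : List (List Char)) (n : Int) : List Int → Bool
  | [] => false
  | i :: rest =>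
    if PySem.List.slice col_parts (some i) (some (i + n)) == indicator_parts then true
    else phiLoopA col_parts indicator_parts n rest

def matches_phi_py (column : String) (indicator : String) : Bool :=
  let col_norm := PySem.Chars.replace (PySem.Chars.strip (PySem.Chars.lower column.toList)) [' '] ['_']
  let indicator_parts := PySem.Chars.splitOn (PySem.Chars.replace (PySem.Chars.lower indicator.toList) [' '] ['_']) ['_']
  let col_parts := PySem.Chars.splitOn col_norm ['_']
  -- Exact match
  if col_norm == PySem.Chars.join ['_'] indicator_parts then true
  else
    let n : Int := indicator_parts.length
    phiLoopA col_parts indicator_parts n (PySem.List.pyRange 0 ((col_parts.length : Int) - n + 1) 1)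

-- ===== PORT B =====
def matches_phi_py_alt (column : String) (indicator : String) : Bool :=
  let col_norm := PySem.Str.replace (PySem.Str.strip (PySem.Str.lower column)) " " "_"
  let ind_norm := PySem.Str.replace (PySem.Str.lower indicator) " " "_"
  PySem.Str.isIn ("_" ++ ind_norm ++ "_") ("_" ++ col_norm ++ "_")

-- ===== PRECONDITION & SPEC =====
def Spec_matches_phi_py (column : String) (indicator : String) (out : Bool) : Prop := out = matches_phi_py_alt column indicator
instance (column : String) (indicator : String) (out : Bool) : Decidable (Spec_matches_phi_py column indicator out) := by unfold Spec_matches_phi_py; infer_instance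

-- ===== CLAIM (what is proved, stated in full; the proofs are below) =====
def Claim_equal_matches_phi_py : Prop := ∀ (column : String) (indicator : String), Dom_matches_phi_py column indicator → Spec_matches_phi_py column indicator (matches_phi_py column indicator)

-- ===== LEMMAS AND PROOFS =====

-- each token prefixed with one '_' ('padTok P ++ ['_']' is the '_'-padded, '_'-joined string)
def padTok (P : List (List Char)) : List Char := (P.map (fun t => '_' :: t)).flatten

theorem padTok_cons (t : List Char) (P : List (List Char)) :
    padTok (t :: P) = '_' :: t ++ padTok P := by simp [padTok]

theorem splitOn_no_us (s : List Char) : ∀ t ∈ s.splitOn '_', '_' ∉ t := by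
  induction s with
  | nil => simp [List.splitOn]
  | cons c t ih =>
    rw [List.splitOn] at *
    rw [List.splitOnP_cons]
    split
    · rename_i h; simp at h; subst h
      intro x hx
      rcases List.mem_cons.mp hx with rfl | hx
      · simp
      · exact ih x hx
    · rename_i h; simp at h
      cases hs : List.splitOnP (fun b => b == '_') t with
      | nil => exact absurd hs (List.splitOnP_ne_nil _ _)
      | cons hd tl =>
        rw [hs] at ih
        intro x hx
        rw [List.modifyHead] at hx
        rcases List.mem_cons.mp hx with rfl | hx
        · intro hm
          rcases List.mem_cons.mp hm with rfl | hm
          · exact h rfl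
          · exact ih hd (by simp) hm
        · exact ih x (by simp [hx])

theorem splitOn_go_eq (fuel : Nat) : ∀ (l cur : List Char) (acc : List (List Char)),
    l.length ≤ fuel →
    PySem.Chars.splitOn.go ['_'] fuel l cur acc =
      acc.reverse ++ List.modifyHead (fun h => cur.reverse ++ h) (l.splitOn '_') := by
  induction fuel with
  | zero =>
    intro l cur acc hf
    have : l = [] := by cases l <;> simp_all
    subst this
    rw [PySem.Chars.splitOn.go]
    simp [List.splitOn]
  | succ fuel ih =>
    intro l cur acc hf
    cases l with
    | nil =>
      rw [PySem.Chars.splitOn.go]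
      · simp [List.splitOn]
      · omega
    | cons c rest =>
      rw [PySem.Chars.splitOn.go]
      simp only [List.splitOn, List.splitOnP_cons]
      by_cases hc : c = '_'
      · subst hc
        have hpre : List.isPrefixOf ['_'] ('_' :: rest) = true := by simp [List.isPrefixOf]
        rw [if_pos hpre]
        simp only [List.length_cons] at hf
        rw [ih _ _ _ (by simpa using hf)]
        cases hs : List.splitOnP (fun x => x == '_') rest <;>
          simp [List.splitOn, hs, List.modifyHead]
      · have hcc : ('_' : Char) ≠ c := fun h => hc h.symm
        have hpre : ¬ (List.isPrefixOf ['_'] (c :: rest) = true) := by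
          simp [List.isPrefixOf, hcc]
        rw [if_neg hpre]
        simp only [List.length_cons] at hf
        rw [ih _ _ _ (by omega)]
        have hne := List.splitOnP_ne_nil (fun b => b == '_') rest
        cases hs : List.splitOnP (fun b => b == '_') rest with
        | nil => exact absurd hs hne
        | cons hd tl =>
          simp [List.splitOn, hs, hc, List.modifyHead]

theorem splitOn_eq (s : List Char) : PySem.Chars.splitOn s ['_'] = s.splitOn '_' := by
  show PySem.Chars.splitOn.go ['_'] (s.length + 1) s [] [] = _
  rw [splitOn_go_eq (s.length + 1) s [] [] (by omega)]
  cases hs : s.splitOn '_' with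
  | nil => exact absurd hs (List.splitOnP_ne_nil _ _)
  | cons hd tl => simp [List.modifyHead]

theorem pad_intercalate (P : List (List Char)) (h : P ≠ []) :
    padTok P = '_' :: List.intercalate ['_'] P := by
  induction P with
  | nil => exact absurd rfl h
  | cons t P ih =>
    cases P with
    | nil => simp [padTok, List.intercalate]
    | cons u Q =>
      rw [padTok_cons, ih (by simp)]
      simp [List.intercalate, List.intersperse]

theorem splitOn_ne_nil' (s : List Char) : s.splitOn '_' ≠ [] := by
  rw [List.splitOn]; exact List.splitOnP_ne_nil _ _

theorem B_pad (s : List Char) : '_' :: s ++ ['_'] = padTok (s.splitOn '_') ++ ['_'] := by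
  rw [pad_intercalate _ (splitOn_ne_nil' s)]
  rw [show List.intercalate ['_'] (s.splitOn '_') = s from List.intercalate_splitOn s '_']

-- 'padTok P ++ '_'::b' starts with '_'
theorem padTok_head (P : List (List Char)) (b : List Char) :
    ∃ w, padTok P ++ '_' :: b = '_' :: w := by
  cases P with
  | nil => exact ⟨b, rfl⟩
  | cons t tl => exact ⟨t ++ (padTok tl ++ '_' :: b), by simp [padTok]⟩

-- token alignment: a '_'-free token forces the position of the next '_'
theorem tok_align (t : List Char) (h : '_' ∉ t) :
    ∀ (a w s : List Char), t ++ '_' :: w = a ++ '_' :: s →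
      ∃ a2, a = t ++ a2 ∧ '_' :: w = a2 ++ '_' :: s := by
  induction t with
  | nil => intro a w s he; exact ⟨a, by simp, he⟩
  | cons c t' ih =>
    intro a w s he
    cases a with
    | nil =>
      simp at he
      exact absurd he.1.symm (by simp at h; exact h.1)
    | cons c2 a1 =>
      simp at he
      obtain ⟨rfl, he⟩ := he
      obtain ⟨a2, rfl, h2⟩ := ih (fun hm => h (List.mem_cons_of_mem _ hm)) a1 w s he
      exact ⟨a2, by simp, h2⟩

-- every occurrence of '_' in the padded string is a token boundary
theorem pad_boundary (P : List (List Char)) (hP : ∀ t ∈ P, '_' ∉ t) :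
    ∀ (a s : List Char), padTok P ++ ['_'] = a ++ '_' :: s →
      ∃ l r, P = l ++ r ∧ a = padTok l ∧ '_' :: s = padTok r ++ ['_'] := by
  induction P with
  | nil =>
    intro a s he
    cases a with
    | nil => exact ⟨[], [], rfl, rfl, by simpa [padTok] using he.symm⟩
    | cons c a1 => simp [padTok] at he
  | cons t P' ih =>
    intro a s he
    rw [padTok_cons] at he
    cases a with
    | nil =>
      refine ⟨[], t :: P', rfl, rfl, ?_⟩
      simp only [List.nil_append] at he
      rw [padTok_cons, ← he]
    | cons c a1 =>
      simp only [List.cons_append, List.append_assoc] at he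
      rw [List.cons.injEq] at he
      obtain ⟨h1, h2⟩ := he
      subst h1
      obtain ⟨w, hw⟩ := padTok_head P' []
      rw [show padTok P' ++ '_' :: [] = padTok P' ++ ['_'] from rfl] at hw
      rw [hw] at h2
      obtain ⟨a2, rfl, h3⟩ := tok_align t (hP t (by simp)) a1 w s h2
      rw [← hw] at h3
      obtain ⟨l', r', rfl, rfl, h4⟩ := ih (fun u hu => hP u (by simp [hu])) a2 s h3
      refine ⟨t :: l', r', rfl, ?_, h4⟩
      rw [padTok_cons]
      simp

-- a padded-token prefix aligns token by token
theorem pad_prefix (Q : List (List Char)) (hQ : ∀ t ∈ Q, '_' ∉ t) :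
    ∀ (r : List (List Char)) (b : List Char), (∀ t ∈ r, '_' ∉ t) →
      padTok r ++ ['_'] = padTok Q ++ '_' :: b → ∃ r2, r = Q ++ r2 := by
  induction Q with
  | nil => intro r b _ _; exact ⟨r, by simp⟩
  | cons q Q' ih =>
    intro r b hr he
    cases r with
    | nil =>
      rw [padTok_cons] at he
      simp [padTok] at he
    | cons t r' =>
      rw [padTok_cons, padTok_cons] at he
      simp only [List.cons_append, List.append_assoc, List.cons.injEq, true_and] at he
      obtain ⟨w1, hw1⟩ := padTok_head r' []
      rw [show padTok r' ++ '_' :: [] = padTok r' ++ ['_'] from rfl] at hw1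
      obtain ⟨w2, hw2⟩ := padTok_head Q' b
      have he2 : t ++ '_' :: w1 = q ++ '_' :: w2 := by
        rw [← hw1, ← hw2]; exact he
      obtain ⟨a2, ha2, h2⟩ := tok_align t (hr t (by simp)) q w1 w2 he2
      obtain ⟨a3, ha3, _⟩ := tok_align q (hQ q (by simp)) t w2 w1 he2.symm
      have : a2 = [] := by
        have l1 := congrArg List.length ha2
        have l2 := congrArg List.length ha3
        simp at l1 l2
        have : a2.length = 0 := by omega
        simpa using this
      subst this
      simp at ha2 h2
      obtain ⟨r2, hr2⟩ := ih (fun u hu => hQ u (by simp [hu])) r' b (fun u hu => hr u (by simp [hu]))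
        (by rw [hw1, h2]; exact hw2.symm)
      subst ha2
      exact ⟨r2, by rw [hr2]; simp⟩

-- main: padded-substring ↔ contiguous token subsequence
theorem pad_infix_iff (P Q : List (List Char)) (hP : ∀ t ∈ P, '_' ∉ t) (hQ : ∀ t ∈ Q, '_' ∉ t) :
    (padTok Q ++ ['_'] <:+: padTok P ++ ['_']) ↔ Q <:+: P := by
  constructor
  · rintro ⟨a, b, hab⟩
    cases Q with
    | nil => exact List.nil_infix
    | cons q Q' =>
      rw [padTok_cons] at hab
      have he : padTok P ++ ['_'] = a ++ '_' :: (q ++ (padTok Q' ++ '_' :: b)) := by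
        rw [← hab]; simp
      obtain ⟨l, r, rfl, rfl, h3⟩ := pad_boundary P hP a _ he
      have h4 : padTok r ++ ['_'] = padTok (q :: Q') ++ '_' :: b := by
        rw [← h3, padTok_cons]; simp
      obtain ⟨r2, rfl⟩ := pad_prefix (q :: Q') hQ r b (fun u hu => hP u (by simp [hu])) h4
      exact ⟨l, r2, by simp⟩
  · rintro ⟨l, r, rfl⟩
    cases r with
    | nil =>
      refine ⟨padTok l, [], ?_⟩
      simp [padTok]
    | cons t r' =>
      refine ⟨padTok l, t ++ (padTok r' ++ ['_']), ?_⟩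
      simp [padTok]

theorem mem_pyRange1 (a b i : Int) : i ∈ PySem.List.pyRange a b 1 ↔ a ≤ i ∧ i < b := by
  simp only [PySem.List.pyRange]
  norm_num
  constructor
  · rintro ⟨k, hk, rfl⟩
    split at hk
    · omega
    · simp at hk
  · rintro ⟨h1, h2⟩
    refine ⟨(i - a).toNat, ?_, by omega⟩
    rw [if_pos (by omega)]
    omega

theorem phiLoopA_true_iff (P Q : List (List Char)) (n : Int) (l : List Int) :
    phiLoopA P Q n l = true ↔ ∃ i ∈ l, PySem.List.slice P (some i) (some (i + n)) = Q := by
  induction l with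
  | nil => simp [phiLoopA]
  | cons i rest ih =>
    simp only [phiLoopA]
    split
    · rename_i h
      rw [beq_iff_eq] at h
      simp [h]
    · rename_i h
      rw [beq_iff_eq] at h
      simp only [List.mem_cons, ih]
      constructor
      · rintro ⟨x, hx, hs⟩; exact ⟨x, Or.inr hx, hs⟩
      · rintro ⟨x, hx, hs⟩
        rcases hx with rfl | hx
        · exact absurd hs h
        · exact ⟨x, hx, hs⟩

theorem window_iff (P Q : List (List Char)) :
    (∃ i ∈ PySem.List.pyRange 0 ((P.length : Int) - (Q.length : Int) + 1) 1,
        PySem.List.slice P (some i) (some (i + (Q.length : Int))) = Q)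
    ↔ Q <:+: P := by
  constructor
  · rintro ⟨i, hi, hs⟩
    rw [mem_pyRange1] at hi
    obtain ⟨h0, hb⟩ := hi
    set k := i.toNat with hk
    have hik : i = (k : Int) := by omega
    rw [hik] at hs
    have : (↑k + (Q.length : Int)) = ((k + Q.length : Nat) : Int) := by push_cast; ring
    rw [this, PySem.List.slice_natCast] at hs
    have hs' : (P.drop k).take Q.length = Q := by simpa using hs
    refine ⟨P.take k, (P.drop k).drop Q.length, ?_⟩
    calc P.take k ++ Q ++ (P.drop k).drop Q.length
        = P.take k ++ ((P.drop k).take Q.length ++ (P.drop k).drop Q.length) := by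
          rw [hs']; simp
      _ = P := by rw [List.take_append_drop, List.take_append_drop]
  · rintro ⟨l, r, rfl⟩
    refine ⟨(l.length : Int), ?_, ?_⟩
    · rw [mem_pyRange1]
      constructor
      · omega
      · simp [List.length_append]; omega
    · have : ((l.length : Int) + (Q.length : Int)) = ((l.length + Q.length : Nat) : Int) := by
        push_cast; ring
      rw [this, PySem.List.slice_natCast]
      have h1 : (l ++ Q ++ r).drop l.length = Q ++ r := by
        rw [List.append_assoc, List.drop_left]
      rw [h1]
      simp

-- A's whole body is the token-infix test
theorem A_iff (C I : List Char) :
    ((if C == PySem.Chars.join ['_'] (PySem.Chars.splitOn I ['_']) then true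
      else phiLoopA (PySem.Chars.splitOn C ['_']) (PySem.Chars.splitOn I ['_'])
        ((PySem.Chars.splitOn I ['_']).length : Int)
        (PySem.List.pyRange 0
          (((PySem.Chars.splitOn C ['_']).length : Int) - ((PySem.Chars.splitOn I ['_']).length : Int) + 1) 1)) = true)
    ↔ I.splitOn '_' <:+: C.splitOn '_' := by
  rw [splitOn_eq, splitOn_eq]
  have hjoin : PySem.Chars.join ['_'] (I.splitOn '_') = I := by
    show List.intercalate ['_'] (I.splitOn '_') = I
    exact List.intercalate_splitOn I '_'
  rw [hjoin]
  split
  · rename_i h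
    rw [beq_iff_eq] at h
    subst h
    simp
  · rw [phiLoopA_true_iff, window_iff]

-- ===== VERDICT (by name: the statement is the Claim_ definition above) =====
theorem matches_phi_py_spec : Claim_equal_matches_phi_py := by
  intro column indicator _
  unfold Spec_matches_phi_py matches_phi_py matches_phi_py_alt
  set C := PySem.Chars.replace (PySem.Chars.strip (PySem.Chars.lower column.toList)) [' '] ['_'] with hC
  set colS := PySem.Str.replace (PySem.Str.strip (PySem.Str.lower column)) " " "_" with hcolS
  set indS := PySem.Str.replace (PySem.Str.lower indicator) " " "_" with hindS
  have hCeq : colS.toList = C := by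
    rw [hcolS, hC]; simp [PySem.Str.toList_replace, PySem.Str.toList_strip, PySem.Str.toList_lower]
  have hIeq : indS.toList = PySem.Chars.replace (PySem.Chars.lower indicator.toList) [' '] ['_'] := by
    rw [hindS]; simp [PySem.Str.toList_replace, PySem.Str.toList_lower]
  set I := PySem.Chars.replace (PySem.Chars.lower indicator.toList) [' '] ['_'] with hI
  rw [Bool.eq_iff_iff]
  rw [A_iff C I]
  rw [PySem.Str.isIn_iff_infix]
  have hpadI : ("_" ++ indS ++ "_").toList = padTok (I.splitOn '_') ++ ['_'] := by
    rw [String.toList_append, String.toList_append, hIeq]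
    have h1 : ("_" : String).toList = ['_'] := rfl
    rw [h1]
    exact B_pad I
  have hpadC : ("_" ++ colS ++ "_").toList = padTok (C.splitOn '_') ++ ['_'] := by
    rw [String.toList_append, String.toList_append, hCeq]
    have h1 : ("_" : String).toList = ['_'] := rfl
    rw [h1]
    exact B_pad C
  rw [hpadI, hpadC]
  rw [pad_infix_iff _ _ (splitOn_no_us C) (splitOn_no_us I)]
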